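-- pv_equiv track=rewrite | github.com/pypi-data/pypi-mirror-74 | packages/xlist/xlist-0.0.8.tar.gz/xlist-0.0.8/xlist/index.py | indexes_lst_slice
-- ===== SOURCE A (Python) =====
-- def indexes_lst_slice(ol,value):
--     length = ol.__len__()
--     end = None
--     slice = []
--     for i in range(length-1,-1,-1):
--         if(ol[i]==value):
--             end = i
--             break
--         else:
--             pass
--     if(end == None):
--         return(None)
--     else:
--         slice.append(end)
--         for i in range(end-1,-1,-1):
--             if(ol[i]==value):
--                 slice.append(i)
--             else:
--                 break
--     slice.reverse()
--     return(slice)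
-- ===== SOURCE B (Python) =====
-- def indexes_lst_slice(ol, value):
--     cur = []
--     last = None
--     for i, x in enumerate(ol):
--         if x == value:
--             cur.append(i)
--         else:
--             if cur:
--                 last = cur
--             cur = []
--     return cur if cur else last
-- ===== Notes on version B (the rewrite author's own statement) =====
-- stated objective: simpler
-- what changed: Replaced A's two backward scans (find last match, then extend the run backwards and reverse) by one forward pass that keeps the current run and the last completed run, so no reversal is needed.
import Mathlib
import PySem

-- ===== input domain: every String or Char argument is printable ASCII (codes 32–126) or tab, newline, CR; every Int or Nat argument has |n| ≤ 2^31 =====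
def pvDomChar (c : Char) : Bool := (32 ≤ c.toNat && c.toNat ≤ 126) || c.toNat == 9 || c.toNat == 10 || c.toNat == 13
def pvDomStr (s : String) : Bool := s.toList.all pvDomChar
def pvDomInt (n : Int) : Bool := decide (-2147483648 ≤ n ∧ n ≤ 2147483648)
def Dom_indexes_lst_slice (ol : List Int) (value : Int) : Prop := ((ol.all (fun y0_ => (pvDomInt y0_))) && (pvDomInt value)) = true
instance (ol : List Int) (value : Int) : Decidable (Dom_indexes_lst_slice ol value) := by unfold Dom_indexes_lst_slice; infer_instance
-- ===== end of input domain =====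

-- B replaces A's two backward scans (find last match, extend the run backwards, reverse) by one
-- forward pass keeping the current run and the last completed run; objective: simpler (same O(n) cost).

-- ===== PORT A =====
-- first loop of A: scan i = k-1, k-2, …, 0 and break at the first i with ol[i] == value
-- (ol[i] is always in range here, so List.getD is exact for Python's ol[i])
def pvFindLast (ol : List Int) (value : Int) : Nat → Option Nat
  | 0 => none
  | k+1 => if ol.getD k 0 = value then some k else pvFindLast ol value k

-- second loop of A: from i = k-1 downwards, append i to slice while ol[i] == value, else break
def pvRunA (ol : List Int) (value : Int) : Nat → List Int → List Int
  | 0, acc => acc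
  | k+1, acc => if ol.getD k 0 = value then pvRunA ol value k (acc ++ [(k : Int)]) else acc

def indexes_lst_slice (ol : List Int) (value : Int) : Option (List Int) :=
  match pvFindLast ol value ol.length with
  | none => none
  | some e => some ((pvRunA ol value e [(e : Int)]).reverse)

-- ===== PORT B =====
-- B's single forward loop over enumerate(ol), state = (current run, last completed run)
def pvLoopB (value : Int) : List Int → Nat → List Int × Option (List Int) → List Int × Option (List Int)
  | [], _, st => st
  | x :: rest, i, (cur, last) =>
    if x = value then pvLoopB value rest (i+1) (cur ++ [(i : Int)], last)
    else pvLoopB value rest (i+1) ([], if cur = [] then last else some cur)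

def indexes_lst_slice_alt (ol : List Int) (value : Int) : Option (List Int) :=
  let st := pvLoopB value ol 0 ([], none)
  if st.1 = [] then st.2 else some st.1

-- ===== PRECONDITION & SPEC =====
def Spec_indexes_lst_slice (ol : List Int) (value : Int) (out : Option (List Int)) : Prop := out = indexes_lst_slice_alt ol value
instance (ol : List Int) (value : Int) (out : Option (List Int)) : Decidable (Spec_indexes_lst_slice ol value out) := by unfold Spec_indexes_lst_slice; infer_instance

-- ===== CLAIM (what is proved, stated in full; the proofs are below) =====
def Claim_equal_indexes_lst_slice : Prop := ∀ (ol : List Int) (value : Int), Dom_indexes_lst_slice ol value → Spec_indexes_lst_slice ol value (indexes_lst_slice ol value)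

-- ===== LEMMAS AND PROOFS =====

lemma pv_getD_append_lt (ol : List Int) (x d : Int) (k : Nat) (h : k < ol.length) :
    (ol ++ [x]).getD k d = ol.getD k d := by
  simp [List.getD, List.getElem?_append_left h]

lemma pv_getD_snoc_self (ol : List Int) (x d : Int) :
    (ol ++ [x]).getD ol.length d = x := by
  simp [List.getD]

lemma pvFindLast_append (ol : List Int) (x value : Int) (k : Nat) (h : k ≤ ol.length) :
    pvFindLast (ol ++ [x]) value k = pvFindLast ol value k := by
  induction k with
  | zero => rfl
  | succ k ih =>
    simp only [pvFindLast, pv_getD_append_lt ol x 0 k (by omega)]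
    rw [ih (by omega)]

lemma pvFindLast_lt (ol : List Int) (value : Int) (k e : Nat)
    (h : pvFindLast ol value k = some e) : e < k := by
  induction k with
  | zero => simp [pvFindLast] at h
  | succ k ih =>
    simp only [pvFindLast] at h
    split at h
    · injection h with h'; omega
    · have := ih h; omega

lemma pvRunA_append (ol : List Int) (x value : Int) (k : Nat) (acc : List Int) (h : k ≤ ol.length) :
    pvRunA (ol ++ [x]) value k acc = pvRunA ol value k acc := by
  induction k generalizing acc with
  | zero => rfl
  | succ k ih =>
    simp only [pvRunA, pv_getD_append_lt ol x 0 k (by omega)]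
    split
    · exact ih _ (by omega)
    · rfl

lemma pvRunA_acc (ol : List Int) (value : Int) (k : Nat) (a b : List Int) :
    pvRunA ol value k (a ++ b) = a ++ pvRunA ol value k b := by
  induction k generalizing b with
  | zero => rfl
  | succ k ih =>
    simp only [pvRunA]
    split
    · rw [List.append_assoc, ih]
    · rfl

lemma pvLoopB_append (value : Int) (l1 l2 : List Int) (i : Nat) (st : List Int × Option (List Int)) :
    pvLoopB value (l1 ++ l2) i st = pvLoopB value l2 (i + l1.length) (pvLoopB value l1 i st) := by
  induction l1 generalizing i st with
  | nil => simp [pvLoopB]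
  | cons y ys ih =>
    obtain ⟨cur, last⟩ := st
    simp only [List.cons_append, pvLoopB]
    split <;> rw [ih] <;> simp <;> ring_nf

lemma pv_main (ol : List Int) (value : Int) :
    (pvLoopB value ol 0 ([], none)).1 = (pvRunA ol value ol.length []).reverse ∧
    indexes_lst_slice ol value =
      (if (pvLoopB value ol 0 ([], none)).1 = [] then (pvLoopB value ol 0 ([], none)).2
       else some (pvLoopB value ol 0 ([], none)).1) := by
  induction ol using List.reverseRecOn with
  | nil => simp [pvLoopB, pvRunA, indexes_lst_slice, pvFindLast]
  | append_singleton ol x ih =>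
    obtain ⟨ih1, ih2⟩ := ih
    rw [pvLoopB_append]
    set st := pvLoopB value ol 0 ([], none) with hst
    obtain ⟨cur, last⟩ := st
    simp only at ih1 ih2 ⊢
    by_cases hx : x = value
    · subst hx
      have hrun : pvRunA (ol ++ [x]) x (ol.length + 1) [] =
          [(ol.length : Int)] ++ pvRunA ol x ol.length [] := by
        simp only [pvRunA, pv_getD_snoc_self]
        rw [if_pos trivial, pvRunA_append ol x x ol.length _ le_rfl,
          show ([] ++ [(ol.length : Int)] : List Int) = [(ol.length : Int)] ++ [] by simp,
          pvRunA_acc]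
      constructor
      · simp [pvLoopB, List.length_append, hrun, ih1]
      · have hA : indexes_lst_slice (ol ++ [x]) x =
            some (((pvRunA ol x ol.length []).reverse) ++ [(ol.length : Int)]) := by
          simp only [indexes_lst_slice, List.length_append, List.length_singleton,
            pvFindLast, pv_getD_snoc_self]
          rw [if_pos trivial]
          show some ((pvRunA (ol ++ [x]) x ol.length [(ol.length : Int)]).reverse) = _
          rw [pvRunA_append ol x x ol.length _ le_rfl,
            show ([(ol.length : Int)] : List Int) = [(ol.length : Int)] ++ [] by simp,
            pvRunA_acc]
          simp
        rw [hA]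
        simp [pvLoopB, ih1]
    · have hA_eq : indexes_lst_slice (ol ++ [x]) value = indexes_lst_slice ol value := by
        simp only [indexes_lst_slice, List.length_append, List.length_singleton,
          pvFindLast, pv_getD_snoc_self, if_neg hx,
          pvFindLast_append ol x value ol.length le_rfl]
        cases he : pvFindLast ol value ol.length with
        | none => rfl
        | some e =>
          have := pvFindLast_lt ol value ol.length e he
          show some ((pvRunA (ol ++ [x]) value e [(e : Int)]).reverse) =
            some ((pvRunA ol value e [(e : Int)]).reverse)
          rw [pvRunA_append ol x value e _ (by omega)]
      constructor
      · simp [pvLoopB, List.length_append, pvRunA, if_neg hx]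
      · simp only [pvLoopB, if_neg hx]
        rw [hA_eq, ih2]
        by_cases hc : cur = [] <;> simp [hc]

-- ===== VERDICT (by name: the statement is the Claim_ definition above) =====
theorem indexes_lst_slice_spec : Claim_equal_indexes_lst_slice := by
  intro ol value _
  unfold Spec_indexes_lst_slice indexes_lst_slice_alt
  exact (pv_main ol value).2
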